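-- pv_equiv track=rewrite | github.com/chettayyuvanika/Questions | Easy/Magic_Potion_Problem.py | minimal_steps
-- ===== SOURCE A (Python) =====
-- def minimal_steps( ingredients ):
--     count=1
--     i=1
--     while(i<len(ingredients)):
--         if(ingredients[i]==ingredients[0]):
--             if(ingredients[0:i]==ingredients[i:i+i]):
--                 count+=1
--                 i=i+i-1
--             else:
--                 count+=1
--         else:
--             count+=1
--         i+=1
--     return count
-- ===== SOURCE B (Python) =====
-- def minimal_steps(ingredients):
--     # Z-function (linear prefix-match array) replaces A's O(i) slice comparison
--     # at each step with an O(1) lookup z[i] >= i.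
--     s = ingredients
--     n = len(s)
--     z = [0] * n
--     l = r = 0
--     for i in range(1, n):
--         zi = min(r - i, z[i - l]) if i < r else 0
--         while i + zi < n and s[zi] == s[i + zi]:
--             zi += 1
--         z[i] = zi
--         if i + zi > r:
--             l, r = i, i + zi
--     count = 1
--     i = 1
--     while i < n:
--         count += 1
--         i = i * 2 if z[i] >= i else i + 1
--     return count
-- ===== Notes on version B (the rewrite author's own statement) =====
-- stated objective: faster
-- what changed: B precomputes the Z-function (prefix-match array) once with the standard linear two-pointer algorithm, so A's O(i) slice comparison s[0:i]==s[i:2i] at each step becomes an O(1) lookup z[i] >= i.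
import Mathlib
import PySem

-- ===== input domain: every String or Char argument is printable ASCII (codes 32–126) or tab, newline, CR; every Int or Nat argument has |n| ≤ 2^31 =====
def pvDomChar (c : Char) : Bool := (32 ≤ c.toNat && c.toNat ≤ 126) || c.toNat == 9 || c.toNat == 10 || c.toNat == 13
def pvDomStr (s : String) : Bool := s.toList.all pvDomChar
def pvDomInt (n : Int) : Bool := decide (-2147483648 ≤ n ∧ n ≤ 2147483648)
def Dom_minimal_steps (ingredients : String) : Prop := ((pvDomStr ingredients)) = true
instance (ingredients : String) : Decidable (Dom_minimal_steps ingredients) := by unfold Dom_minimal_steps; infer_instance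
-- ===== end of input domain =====

-- B replaces A's O(i) slice comparison at each position with an O(1) lookup in a
-- Z-function (prefix-match) array computed once; same count on every input.

-- ===== PORT A =====
-- A's while loop, one recursive call per iteration; indices are in range where
-- Python indexes (i ≥ 1, i < len), so getD is exact.  The `0 < i` part of the
-- guard is a totality guard only: the loop is entered at i = 1 and i only grows.
def pvStepsA (l : List Char) (i count : Nat) : Nat :=
  if h : 0 < i ∧ i < l.length then
    if l.getD i ' ' = l.getD 0 ' ' then
      if l.take i = (l.drop i).take i then pvStepsA l (i + i) (count + 1)  -- i=i+i-1; i+=1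
      else pvStepsA l (i + 1) (count + 1)
    else pvStepsA l (i + 1) (count + 1)
  else count
termination_by l.length - i
decreasing_by all_goals (obtain ⟨h1, h2⟩ := h; omega)

def minimal_steps (ingredients : String) : Int :=
  (pvStepsA ingredients.toList 1 1 : Int)

-- ===== PORT B =====
-- Source B's inner `while i + zi < n and s[zi] == s[i + zi]: zi += 1`
def pvExtend (l : List Char) (i zi : Nat) : Nat :=
  if h : i + zi < l.length ∧ l.getD zi ' ' = l.getD (i + zi) ' ' then
    pvExtend l i (zi + 1)
  else zi
termination_by l.length - (i + zi)
decreasing_by obtain ⟨h1, -⟩ := h; omega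

-- Source B's `for i in range(1, n)` building the Z-array
def pvZLoop (l : List Char) (i : Nat) (z : List Nat) (lft r : Nat) : List Nat :=
  if _h : i < l.length then
    let v := if i < r then min (r - i) (z.getD (i - lft) 0) else 0
    let zi := pvExtend l i v
    let z' := z.set i zi
    if r < i + zi then pvZLoop l (i + 1) z' i (i + zi)
    else pvZLoop l (i + 1) z' lft r
  else z
termination_by l.length - i
decreasing_by all_goals omega

-- Source B's final counting loop (`0 < i` again only a totality guard)
def pvCount (z : List Nat) (n i count : Nat) : Nat :=
  if h : 0 < i ∧ i < n then
    if i ≤ z.getD i 0 then pvCount z n (i * 2) (count + 1)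
    else pvCount z n (i + 1) (count + 1)
  else count
termination_by n - i
decreasing_by all_goals (obtain ⟨h1, h2⟩ := h; omega)

def minimal_steps_alt (ingredients : String) : Int :=
  let l := ingredients.toList
  let z := pvZLoop l 1 (List.replicate l.length 0) 0 0
  (pvCount z l.length 1 1 : Int)

-- ===== PRECONDITION & SPEC =====
def Spec_minimal_steps (ingredients : String) (out : Int) : Prop := out = minimal_steps_alt ingredients
instance (ingredients : String) (out : Int) : Decidable (Spec_minimal_steps ingredients out) := by unfold Spec_minimal_steps; infer_instance

-- ===== CLAIM (what is proved, stated in full; the proofs are below) =====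
def Claim_equal_minimal_steps : Prop := ∀ (ingredients : String), Dom_minimal_steps ingredients → Spec_minimal_steps ingredients (minimal_steps ingredients)

-- ===== LEMMAS AND PROOFS =====

-- longest common prefix of two character lists (specification device)
def pvLcp : List Char → List Char → Nat
  | a :: as, b :: bs => if a = b then pvLcp as bs + 1 else 0
  | _, _ => 0

lemma pvLcp_le_left : ∀ a b : List Char, pvLcp a b ≤ a.length
  | [], b => by cases b <;> simp [pvLcp]
  | _ :: _, [] => by simp [pvLcp]
  | x :: xs, y :: ys => by
      simp only [pvLcp]
      split
      · have := pvLcp_le_left xs ys; simp [List.length_cons]; omega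
      · simp

lemma pvLcp_le_right : ∀ a b : List Char, pvLcp a b ≤ b.length
  | [], b => by cases b <;> simp [pvLcp]
  | _ :: _, [] => by simp [pvLcp]
  | x :: xs, y :: ys => by
      simp only [pvLcp]
      split
      · have := pvLcp_le_right xs ys; simp [List.length_cons]; omega
      · simp

lemma pvLcp_getD : ∀ (a b : List Char) (j : Nat), j < pvLcp a b →
    a.getD j ' ' = b.getD j ' '
  | [], b, j, h => by cases b <;> simp [pvLcp] at h
  | _ :: _, [], j, h => by simp [pvLcp] at h
  | x :: xs, y :: ys, j, h => by
      simp only [pvLcp] at h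
      split at h
      · next hxy =>
          cases j with
          | zero => simpa [List.getD] using hxy
          | succ j => simpa [List.getD] using pvLcp_getD xs ys j (by omega)
      · omega

lemma pvLcp_ge : ∀ (m : Nat) (a b : List Char), m ≤ a.length → m ≤ b.length →
    (∀ j, j < m → a.getD j ' ' = b.getD j ' ') → m ≤ pvLcp a b
  | 0, _, _, _, _, _ => Nat.zero_le _
  | m + 1, [], _, ha, _, _ => by simp at ha
  | m + 1, _ :: _, [], _, hb, _ => by simp at hb
  | m + 1, x :: xs, y :: ys, ha, hb, h => by
      have hxy : x = y := by simpa [List.getD] using h 0 (by omega)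
      have := pvLcp_ge m xs ys (by simpa using ha) (by simpa using hb)
        (fun j hj => by simpa [List.getD] using h (j + 1) (by omega))
      simp only [pvLcp, if_pos hxy]
      omega

lemma pvLcp_stop : ∀ (a b : List Char), pvLcp a b < a.length → pvLcp a b < b.length →
    a.getD (pvLcp a b) ' ' ≠ b.getD (pvLcp a b) ' '
  | [], b, ha, _ => by cases b <;> simp [pvLcp] at ha
  | _ :: _, [], _, hb => by simp [pvLcp] at hb
  | x :: xs, y :: ys, ha, hb => by
      by_cases hxy : x = y
      · have h1 : pvLcp (x :: xs) (y :: ys) = pvLcp xs ys + 1 := by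
          simp [pvLcp, hxy]
        rw [h1] at ha hb ⊢
        simpa [List.getD] using pvLcp_stop xs ys (by simpa using ha) (by simpa using hb)
      · have h1 : pvLcp (x :: xs) (y :: ys) = 0 := by simp [pvLcp, hxy]
        rw [h1]
        simpa [List.getD] using hxy

lemma pvGetD_drop (l : List Char) (i j : Nat) :
    (l.drop i).getD j ' ' = l.getD (i + j) ' ' := by
  simp [List.getD, List.getElem?_drop]

-- Z-function specification: Zf l i = length of the longest common prefix of l and l[i:]
def pvZf (l : List Char) (i : Nat) : Nat := pvLcp l (l.drop i)

lemma pvZf_le (l : List Char) (i : Nat) : pvZf l i ≤ l.length - i := by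
  simpa [pvZf] using pvLcp_le_right l (l.drop i)

lemma pvZf_getD (l : List Char) (i j : Nat) (h : j < pvZf l i) :
    l.getD j ' ' = l.getD (i + j) ' ' := by
  have := pvLcp_getD l (l.drop i) j h
  rwa [pvGetD_drop] at this

-- the extension loop, started at any v ≤ Zf, stops exactly at Zf
lemma pvExtend_eq (l : List Char) (i : Nat) :
    ∀ (k v : Nat), v ≤ pvZf l i → pvZf l i - v ≤ k → pvExtend l i v = pvZf l i := by
  intro k
  induction k with
  | zero =>
    intro v hv hk
    have hveq : v = pvZf l i := by omega
    subst hveq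
    rw [pvExtend, dif_neg]
    rintro ⟨h1, h2⟩
    have hlt1 : pvZf l i < l.length := by omega
    have hlt2 : pvZf l i < (l.drop i).length := by
      simp only [List.length_drop]; omega
    have := pvLcp_stop l (l.drop i) hlt1 hlt2
    rw [pvGetD_drop] at this
    exact this h2
  | succ k ih =>
    intro v hv hk
    by_cases hveq : v = pvZf l i
    · subst hveq
      rw [pvExtend, dif_neg]
      rintro ⟨h1, h2⟩
      have hlt1 : pvZf l i < l.length := by omega
      have hlt2 : pvZf l i < (l.drop i).length := by
        simp only [List.length_drop]; omega
      have := pvLcp_stop l (l.drop i) hlt1 hlt2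
      rw [pvGetD_drop] at this
      exact this h2
    · have hvlt : v < pvZf l i := by omega
      have hzle := pvZf_le l i
      rw [pvExtend, dif_pos]
      · exact ih (v + 1) (by omega) (by omega)
      · refine ⟨by omega, ?_⟩
        have := pvZf_getD l i v hvlt
        exact this

-- the window (l..r) of the Z algorithm lets us start at min(r-i, z[i-l]) ≤ Zf i
lemma pvWindow (l : List Char) (lft i r : Nat) (h1 : lft < i) (h2 : i < r)
    (h3 : r ≤ lft + pvZf l lft) :
    min (r - i) (pvZf l (i - lft)) ≤ pvZf l i := by
  have hZl := pvZf_le l lft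
  have hZk := pvZf_le l (i - lft)
  have hm1 : min (r - i) (pvZf l (i - lft)) ≤ r - i := Nat.min_le_left _ _
  have hm2 : min (r - i) (pvZf l (i - lft)) ≤ pvZf l (i - lft) := Nat.min_le_right _ _
  apply pvLcp_ge
  · omega
  · simp only [List.length_drop]; omega
  · intro j hj
    rw [pvGetD_drop]
    have e1 : l.getD j ' ' = l.getD ((i - lft) + j) ' ' :=
      pvZf_getD l (i - lft) j (by omega)
    have e2 : l.getD ((i - lft) + j) ' ' = l.getD (lft + ((i - lft) + j)) ' ' :=
      pvZf_getD l lft ((i - lft) + j) (by omega)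
    have e3 : lft + ((i - lft) + j) = i + j := by omega
    rw [e1, e2, e3]

lemma pvGetD_take (l : List Char) (m j : Nat) (h : j < m) :
    (l.take m).getD j ' ' = l.getD j ' ' := by
  simp [List.getD, List.getElem?_take_of_lt, h]

lemma pvGetD_ext (a b : List Char) (hl : a.length = b.length)
    (h : ∀ j, j < a.length → a.getD j ' ' = b.getD j ' ') : a = b := by
  apply List.ext_getElem hl
  intro j h1 h2
  have := h j h1
  rwa [List.getD_eq_getElem _ _ h1, List.getD_eq_getElem _ _ h2] at this

-- A's doubling condition at position i is exactly "Z[i] ≥ i"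
lemma pvCond (l : List Char) (i : Nat) (h0 : 0 < i) (h1 : i < l.length) :
    (l.getD i ' ' = l.getD 0 ' ' ∧ l.take i = (l.drop i).take i) ↔ i ≤ pvZf l i := by
  constructor
  · rintro ⟨_, htake⟩
    have hlen := congrArg List.length htake
    simp only [List.length_take, List.length_drop] at hlen
    have hle : i ≤ l.length - i := by omega
    apply pvLcp_ge i l (l.drop i) (by omega) (by simp only [List.length_drop]; omega)
    intro j hj
    have h' := congrArg (fun t => List.getD t j ' ') htake
    simp only at h'
    rw [pvGetD_take _ _ _ hj, pvGetD_take _ _ _ hj] at h'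
    exact h'
  · intro hz
    have hle := pvZf_le l i
    constructor
    · have := pvZf_getD l i 0 (by omega)
      simpa using this.symm
    · apply pvGetD_ext
      · simp only [List.length_take, List.length_drop]; omega
      · intro j hj
        simp only [List.length_take] at hj
        have hji : j < i := by omega
        rw [pvGetD_take _ _ _ hji, pvGetD_take _ _ _ hji]
        have := pvZf_getD l i j (by omega)
        rw [this, pvGetD_drop]

lemma pvGetD_set (z : List Nat) (i j a : Nat) (hj : j < z.length) :
    (z.set i a).getD j 0 = if i = j then a else z.getD j 0 := by
  simp [List.getD, List.getElem?_set]
  split <;> simp_all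

-- the Z loop fills z with the true Z-function values
lemma pvZLoop_spec (l : List Char) :
    ∀ (fuel i : Nat) (z : List Nat) (lft r : Nat), l.length - i ≤ fuel → 0 < i →
    z.length = l.length →
    (r ≤ i ∨ (0 < lft ∧ lft < i ∧ r ≤ lft + pvZf l lft)) →
    (∀ j, 0 < j → j < i → z.getD j 0 = pvZf l j) →
    ∀ j, 0 < j → j < l.length → (pvZLoop l i z lft r).getD j 0 = pvZf l j := by
  intro fuel
  induction fuel with
  | zero =>
    intro i z lft r hfuel hi hlen hw hz j hj1 hj2
    rw [pvZLoop, dif_neg (by omega)]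
    exact hz j hj1 (by omega)
  | succ fuel ih =>
    intro i z lft r hfuel hi hlen hw hz j hj1 hj2
    by_cases hin : i < l.length
    · rw [pvZLoop, dif_pos hin]
      simp only
      have hv : (if i < r then min (r - i) (z.getD (i - lft) 0) else 0) ≤ pvZf l i := by
        split
        · next hir =>
            obtain ⟨hl0, hli, hrw⟩ : 0 < lft ∧ lft < i ∧ r ≤ lft + pvZf l lft := by
              rcases hw with hw | hw
              · omega
              · exact hw
            have hkz : z.getD (i - lft) 0 = pvZf l (i - lft) :=
              hz (i - lft) (by omega) (by omega)
            rw [hkz]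
            exact pvWindow l lft i r hli hir hrw
        · exact Nat.zero_le _
      have hzi : pvExtend l i (if i < r then min (r - i) (z.getD (i - lft) 0) else 0)
          = pvZf l i :=
        pvExtend_eq l i (pvZf l i) _ hv (by omega)
      rw [hzi]
      have hlen' : (z.set i (pvZf l i)).length = l.length := by
        simpa using hlen
      have hz' : ∀ j', 0 < j' → j' < i + 1 →
          (z.set i (pvZf l i)).getD j' 0 = pvZf l j' := by
        intro j' hj'1 hj'2
        rw [pvGetD_set _ _ _ _ (by omega)]
        split
        · next hij => rw [← hij]
        · next hij => exact hz j' hj'1 (by omega)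
      split
      · exact ih (i + 1) _ i (i + pvZf l i) (by omega) (by omega) hlen'
          (Or.inr ⟨by omega, by omega, Nat.le_refl _⟩) hz' j hj1 hj2
      · refine ih (i + 1) _ lft r (by omega) (by omega) hlen' ?_ hz' j hj1 hj2
        rcases hw with hw | hw
        · exact Or.inl (by omega)
        · exact Or.inr ⟨hw.1, by omega, hw.2.2⟩
    · rw [pvZLoop, dif_neg hin]
      exact hz j hj1 (by omega)

-- with a correct Z-array, B's counting loop runs in lockstep with A's loop
lemma pvCount_eq (l : List Char) (z : List Nat)
    (hz : ∀ j, 0 < j → j < l.length → z.getD j 0 = pvZf l j) :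
    ∀ (fuel i count : Nat), l.length - i ≤ fuel →
    pvStepsA l i count = pvCount z l.length i count := by
  intro fuel
  induction fuel with
  | zero =>
    intro i count hfuel
    rw [pvStepsA, pvCount, dif_neg (by omega), dif_neg (by omega)]
  | succ fuel ih =>
    intro i count hfuel
    by_cases hg : 0 < i ∧ i < l.length
    · rw [pvStepsA, pvCount, dif_pos hg, dif_pos hg]
      rw [hz i hg.1 hg.2]
      by_cases hc : i ≤ pvZf l i
      · obtain ⟨hch, htk⟩ := (pvCond l i hg.1 hg.2).mpr hc
        rw [if_pos hch, if_pos htk, if_pos hc]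
        have h2 : i * 2 = i + i := by omega
        rw [h2]
        exact ih (i + i) (count + 1) (by omega)
      · rw [if_neg hc]
        by_cases hch : l.getD i ' ' = l.getD 0 ' '
        · have htk : ¬ l.take i = (l.drop i).take i := fun htk =>
            hc ((pvCond l i hg.1 hg.2).mp ⟨hch, htk⟩)
          rw [if_pos hch, if_neg htk]
          exact ih (i + 1) (count + 1) (by omega)
        · rw [if_neg hch]
          exact ih (i + 1) (count + 1) (by omega)
    · rw [pvStepsA, pvCount, dif_neg hg, dif_neg hg]

-- ===== VERDICT (by name: the statement is the Claim_ definition above) =====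
theorem minimal_steps_spec : Claim_equal_minimal_steps := by
  unfold Claim_equal_minimal_steps
  intro s _
  unfold Spec_minimal_steps minimal_steps minimal_steps_alt
  simp only
  congr 1
  have hz := pvZLoop_spec s.toList s.toList.length 1
    (List.replicate s.toList.length 0) 0 0 (by omega) (by omega)
    (by simp) (Or.inl (by omega)) (by omega)
  exact pvCount_eq s.toList _ hz s.toList.length 1 1 (by omega)
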